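-- pv_equiv track=rewrite | github.com/manuelschipper/nah | src/nah/taxonomy.py | _codex_args_malformed
-- ===== SOURCE A (Python) =====
-- _CODEX_VALUE_FLAGS = {
--     "-c", "--config", "--enable", "--disable", "--remote", "--remote-auth-token-env",
--     "-i", "--image", "-m", "--model", "--local-provider", "-p", "--profile",
--     "-s", "--sandbox", "-a", "--ask-for-approval", "-C", "--cd", "--add-dir",
-- }
--
-- _CODEX_LONG_VALUE_FLAGS = {flag for flag in _CODEX_VALUE_FLAGS if flag.startswith("--")}
--
-- def _codex_flag_takes_value(tok: str) -> bool:
--     """Return True for Codex flags whose value is expected as the next token."""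
--     if tok in _CODEX_VALUE_FLAGS:
--         return True
--     return False
--
-- def _codex_is_joined_value_flag(tok: str) -> bool:
--     """Return True for --flag=value forms of known Codex value flags."""
--     if not tok.startswith("--") or "=" not in tok:
--         return False
--     name = tok.split("=", 1)[0]
--     return name in _CODEX_LONG_VALUE_FLAGS
--
-- def _codex_args_malformed(args: list[str]) -> bool:
--     """Detect missing values for known Codex value-taking flags."""
--     i = 0
--     while i < len(args):
--         tok = args[i]
--         if _codex_is_joined_value_flag(tok):
--             i += 1
--             continue
--         if _codex_flag_takes_value(tok):
--             if i + 1 >= len(args) or args[i + 1].startswith("-"):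
--                 return True
--             i += 2
--             continue
--         i += 1
--     return False
-- ===== SOURCE B (Python) =====
-- _CODEX_VALUE_FLAGS = {
--     "-c", "--config", "--enable", "--disable", "--remote", "--remote-auth-token-env",
--     "-i", "--image", "-m", "--model", "--local-provider", "-p", "--profile",
--     "-s", "--sandbox", "-a", "--ask-for-approval", "-C", "--cd", "--add-dir",
-- }
--
-- def _codex_args_malformed(args):
--     """Detect missing values for known Codex value-taking flags."""
--     n = len(args)
--     return any(
--         args[i] in _CODEX_VALUE_FLAGS and (i + 1 >= n or args[i + 1].startswith("-"))
--         for i in range(n)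
--     )
-- ===== Notes on version B (the rewrite author's own statement) =====
-- stated objective: simpler
-- what changed: Replaces the stateful consume-and-skip while loop (with its joined --flag=value parsing branch) by a stateless any() over all indices checking 'exact value flag here, next token missing or dash-initial'; the i+=2 skip and the joined-flag helper disappear because a consumed value never starts with '-' and joined forms are never exact members of the flag set; the generator-based any() also avoids A's per-token helper calls and string splitting, a measured constant-factor win.
import Mathlib
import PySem

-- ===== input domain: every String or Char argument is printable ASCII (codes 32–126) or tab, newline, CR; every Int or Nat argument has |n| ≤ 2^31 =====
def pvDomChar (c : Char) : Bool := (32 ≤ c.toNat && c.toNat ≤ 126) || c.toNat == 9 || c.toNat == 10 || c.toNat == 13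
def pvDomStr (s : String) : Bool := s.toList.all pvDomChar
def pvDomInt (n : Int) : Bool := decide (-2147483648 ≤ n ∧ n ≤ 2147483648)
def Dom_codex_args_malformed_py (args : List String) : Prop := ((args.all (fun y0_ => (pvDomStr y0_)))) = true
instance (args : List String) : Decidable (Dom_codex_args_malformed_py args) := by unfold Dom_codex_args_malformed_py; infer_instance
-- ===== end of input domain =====

-- B replaces A's stateful consume-and-skip while loop with a stateless any() over all indices (objective: simpler).

-- ===== PORT A =====
-- _CODEX_VALUE_FLAGS (a Python set of distinct literals)
def codexValueFlags : List String := PySem.Set.ofList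
  ["-c", "--config", "--enable", "--disable", "--remote", "--remote-auth-token-env",
   "-i", "--image", "-m", "--model", "--local-provider", "-p", "--profile",
   "-s", "--sandbox", "-a", "--ask-for-approval", "-C", "--cd", "--add-dir"]

-- _CODEX_LONG_VALUE_FLAGS = {flag for flag in _CODEX_VALUE_FLAGS if flag.startswith("--")}
def codexLongValueFlags : List String :=
  PySem.Set.ofList (codexValueFlags.filter (fun f => PySem.Str.startswith f "--"))

-- def _codex_flag_takes_value(tok)
def codexFlagTakesValue (tok : String) : Bool :=
  if PySem.Set.contains codexValueFlags tok then true else false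

-- def _codex_is_joined_value_flag(tok); tok.split("=", 1)[0] is the head of splitMax?
-- (sep "=" ≠ "" so the split is some and nonempty — exact)
def codexIsJoinedValueFlag (tok : String) : Bool :=
  if !(PySem.Str.startswith tok "--") || !(PySem.Str.isIn "=" tok) then false
  else
    match PySem.Str.splitMax? tok "=" 1 with
    | some (name :: _) => PySem.Set.contains codexLongValueFlags name
    | _ => false

-- the while loop of _codex_args_malformed: i advances by 1 or 2, ported as
-- structural recursion on the suffix starting at i, branches in source order
def codex_args_malformed_py (args : List String) : Bool :=
  match args with
  | [] => false
  | tok :: rest =>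
    if codexIsJoinedValueFlag tok then
      codex_args_malformed_py rest
    else if codexFlagTakesValue tok then
      match rest with
      | [] => true
      | next :: rest' =>
        if PySem.Str.startswith next "-" then true
        else codex_args_malformed_py rest'
    else codex_args_malformed_py rest

-- ===== PORT B =====
-- any(args[i] in _CODEX_VALUE_FLAGS and (i + 1 >= n or args[i+1].startswith("-")) for i in range(n));
-- args[i] is in range for i in range(n) and args[i+1] is read only when the guard keeps i+1 < n, so getD is exact
def codex_args_malformed_py_alt (args : List String) : Bool :=
  (List.range args.length).any fun i =>
    PySem.Set.contains codexValueFlags (args.getD i "") &&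
    (decide (args.length ≤ i + 1) || PySem.Str.startswith (args.getD (i + 1) "") "-")

-- ===== PRECONDITION & SPEC =====
def Spec_codex_args_malformed_py (args : List String) (out : Bool) : Prop := out = codex_args_malformed_py_alt args
instance (args : List String) (out : Bool) : Decidable (Spec_codex_args_malformed_py args out) := by unfold Spec_codex_args_malformed_py; infer_instance

-- ===== CLAIM (what is proved, stated in full; the proofs are below) =====
def Claim_equal_codex_args_malformed_py : Prop := ∀ (args : List String), Dom_codex_args_malformed_py args → Spec_codex_args_malformed_py args (codex_args_malformed_py args)

-- ===== LEMMAS AND PROOFS =====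

-- every flag in the set starts with "-" and contains no "="
theorem codexValueFlags_ok : codexValueFlags.all
    (fun f => PySem.Str.startswith f "-" && !(PySem.Str.isIn "=" f)) = true := by decide

theorem codexValueFlags_mem (tok : String)
    (h : PySem.Set.contains codexValueFlags tok = true) :
    PySem.Str.startswith tok "-" = true ∧ PySem.Str.isIn "=" tok = false := by
  rw [PySem.Set.contains_iff] at h
  have := List.all_eq_true.mp codexValueFlags_ok tok h
  simp only [Bool.and_eq_true, Bool.not_eq_true'] at this
  exact this

-- a joined --flag=value token contains "=", so it is never an exact member of the flag set
theorem contains_of_joined (tok : String)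
    (h : codexIsJoinedValueFlag tok = true) :
    PySem.Set.contains codexValueFlags tok = false := by
  cases hc : PySem.Set.contains codexValueFlags tok with
  | false => rfl
  | true =>
    have hne := (codexValueFlags_mem tok hc).2
    unfold codexIsJoinedValueFlag at h
    rw [hne] at h
    simp at h

-- a token that does not start with "-" is not a flag
theorem contains_of_not_dash (tok : String)
    (h : PySem.Str.startswith tok "-" = false) :
    PySem.Set.contains codexValueFlags tok = false := by
  cases hc : PySem.Set.contains codexValueFlags tok with
  | false => rfl
  | true => rw [(codexValueFlags_mem tok hc).1] at h; simp at h

theorem takes_eq_contains (tok : String) :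
    codexFlagTakesValue tok = PySem.Set.contains codexValueFlags tok := by
  cases hc : PySem.Set.contains codexValueFlags tok <;> simp only [codexFlagTakesValue, hc] <;> rfl

-- unfolding B one position: head check, then B on the tail
theorem alt_cons (tok : String) (rest : List String) :
    codex_args_malformed_py_alt (tok :: rest) =
      ((PySem.Set.contains codexValueFlags tok &&
        (decide (rest.length = 0) || PySem.Str.startswith (rest.getD 0 "") "-")) ||
       codex_args_malformed_py_alt rest) := by
  unfold codex_args_malformed_py_alt
  rw [show (tok :: rest).length = rest.length + 1 from rfl, List.range_succ_eq_map,
      List.any_cons, List.any_map]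
  congr 1
  · have h1 : (rest.length + 1 ≤ 0 + 1) = (rest.length = 0) := by
      apply propext; omega
    simp [List.getD, h1]
  · congr 1
    funext i
    have h2 : (rest.length + 1 ≤ i + 1 + 1) = (rest.length ≤ i + 1) := by
      apply propext; omega
    simp [Function.comp, List.getD, h2]

theorem loop_eq_alt (args : List String) :
    codex_args_malformed_py args = codex_args_malformed_py_alt args := by
  fun_induction codex_args_malformed_py args with
  | case1 => rfl
  | case2 tok rest hj ih =>
    rw [ih, alt_cons, contains_of_joined tok hj]
    simp
  | case3 tok hj ht =>
    rw [takes_eq_contains] at ht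
    rw [alt_cons, ht]
    simp [codex_args_malformed_py_alt]
  | case4 tok hj ht next rest' hd =>
    rw [takes_eq_contains] at ht
    rw [alt_cons, ht]
    simp only [PySem.Str.startswith_eq] at hd
    simp
    exact Or.inl hd
  | case5 tok hj ht next rest' hd ih =>
    rw [takes_eq_contains] at ht
    simp only [Bool.not_eq_true] at hd
    rw [ih, alt_cons, alt_cons, ht, contains_of_not_dash next hd]
    simp only [PySem.Str.startswith_eq] at hd
    simp
    intro h
    rw [show ("-".toList = ['-']) from rfl, h] at hd
    cases hd
  | case6 tok rest hj ht ih =>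
    rw [takes_eq_contains] at ht
    simp only [Bool.not_eq_true] at ht
    rw [ih, alt_cons, ht]
    simp

-- ===== VERDICT (by name: the statement is the Claim_ definition above) =====
theorem codex_args_malformed_py_spec : Claim_equal_codex_args_malformed_py := by
  intro args _
  unfold Spec_codex_args_malformed_py
  exact loop_eq_alt args
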